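-- pv_equiv track=rewrite | github.com/Y6E9K/Y6E9K | backend/app/engine/solver.py | build_joker_cells
-- ===== SOURCE A (Python) =====
-- from typing import Any, Dict, Iterable, List, Optional, Set, Tuple
--
-- def build_joker_cells(placed: List[Tuple[int, int, str]], joker_used: List[str]):
--     joker_pool = list(joker_used)
--     joker_cells = set()
--
--     for r, c, ch in placed:
--         if ch in joker_pool:
--             joker_cells.add((r, c))
--             joker_pool.remove(ch)
--
--     return joker_cells
-- ===== SOURCE B (Python) =====
-- def build_joker_cells(placed, joker_used):
--     # Phase 1: multiplicity of each joker character.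
--     counts = {}
--     for ch in joker_used:
--         counts[ch] = counts.get(ch, 0) + 1
--     # Phase 2: jokers of different characters are consumed independently, so for
--     # each distinct joker character the winning positions are exactly the first
--     # counts[ch] positions of placed holding that character.
--     winners = set()
--     for ch in counts:
--         idxs = [i for i, (_, _, c2) in enumerate(placed) if c2 == ch]
--         winners.update(idxs[:counts[ch]])
--     # Phase 3: collect the cells at the winning positions.
--     return {(r, c) for i, (r, c, ch) in enumerate(placed) if i in winners}
-- ===== Notes on version B (the rewrite author's own statement) =====
-- stated objective: alternative
-- what changed: Replaces A's single greedy pass over placed with a mutating joker pool by a staged group-and-slice computation: count jokers per character, then for each distinct joker character take the first counts[ch] positions of that character as winners, and finally collect the cells at the winning positions; correct because jokers of different characters are consumed independently.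
import Mathlib
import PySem

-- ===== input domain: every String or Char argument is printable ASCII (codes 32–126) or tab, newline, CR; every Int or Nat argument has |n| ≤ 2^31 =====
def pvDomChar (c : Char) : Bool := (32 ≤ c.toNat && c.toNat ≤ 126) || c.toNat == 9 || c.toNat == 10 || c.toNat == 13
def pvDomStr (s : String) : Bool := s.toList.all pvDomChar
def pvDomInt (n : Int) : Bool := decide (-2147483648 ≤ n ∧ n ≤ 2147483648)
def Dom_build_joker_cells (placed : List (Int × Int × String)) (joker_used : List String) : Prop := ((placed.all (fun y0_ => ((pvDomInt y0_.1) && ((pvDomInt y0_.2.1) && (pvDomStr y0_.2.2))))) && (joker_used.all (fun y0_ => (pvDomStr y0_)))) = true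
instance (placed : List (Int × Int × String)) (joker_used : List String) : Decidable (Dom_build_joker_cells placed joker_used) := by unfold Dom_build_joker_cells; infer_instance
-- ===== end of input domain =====

-- B replaces A's single greedy pass (mutable joker pool, membership + remove per cell) by a staged
-- group-and-slice computation: count jokers per character, take the first counts[ch] positions of
-- each distinct joker character as winners, then collect the cells at the winning positions.

-- ===== PORT A =====
-- joker_pool = list(joker_used); for r,c,ch in placed: if ch in joker_pool: add (r,c); joker_pool.remove(ch)
def build_joker_cells (placed : List (Int × Int × String)) (joker_used : List String) : List (Int × Int) :=
  (placed.foldl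
    (fun (st : PySem.Set (Int × Int) × List String) t =>
      let (r, c, ch) := t
      if st.2.contains ch then
        (PySem.Set.add st.1 (r, c), (PySem.List.remove? st.2 ch).getD st.2)
      else st)
    (PySem.Set.empty, joker_used)).1

-- ===== PORT B =====
-- counts = {}; for ch in joker_used: counts[ch] = counts.get(ch,0)+1
-- winners = set(); for ch in counts: idxs = [i for i,(_,_,c2) in enumerate(placed) if c2 == ch]; winners.update(idxs[:counts[ch]])
-- return {(r,c) for i,(r,c,ch) in enumerate(placed) if i in winners}
def build_joker_cells_alt (placed : List (Int × Int × String)) (joker_used : List String) : List (Int × Int) :=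
  let counts : PySem.Dict String Int :=
    joker_used.foldl (fun d ch => d.insert ch (d.getD ch 0 + 1)) PySem.Dict.empty
  let winners : PySem.Set Int :=
    counts.keys.foldl
      (fun w ch =>
        let idxs := ((PySem.List.enumerate placed 0).filter (fun q => q.2.2.2 == ch)).map (fun q => q.1)
        PySem.Set.update w (PySem.List.slice idxs none (some (counts.getD ch 0))))
      PySem.Set.empty
  (PySem.List.enumerate placed 0).foldl
    (fun cs q => if winners.contains q.1 then PySem.Set.add cs (q.2.1, q.2.2.1) else cs)
    PySem.Set.empty

-- ===== PRECONDITION & SPEC =====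
def Spec_build_joker_cells (placed : List (Int × Int × String)) (joker_used : List String) (out : List (Int × Int)) : Prop := out = build_joker_cells_alt placed joker_used
instance (placed : List (Int × Int × String)) (joker_used : List String) (out : List (Int × Int)) : Decidable (Spec_build_joker_cells placed joker_used out) := by unfold Spec_build_joker_cells; infer_instance

-- ===== CLAIM (what is proved, stated in full; the proofs are below) =====
def Claim_equal_build_joker_cells : Prop := ∀ (placed : List (Int × Int × String)) (joker_used : List String), Dom_build_joker_cells placed joker_used → Spec_build_joker_cells placed joker_used (build_joker_cells placed joker_used)

-- ===== LEMMAS AND PROOFS =====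

-- A's pool fold equals a counter-decrement fold whenever the counter agrees pointwise
-- with the multiplicities of the pool list.
theorem fold_agree (placed : List (Int × Int × String)) (cells : PySem.Set (Int × Int))
    (pool : List String) (d : PySem.Dict String Int)
    (h : ∀ ch, d.getD ch 0 = (pool.count ch : Int)) :
    (placed.foldl
      (fun (st : PySem.Set (Int × Int) × List String) t =>
        let (r, c, ch) := t
        if st.2.contains ch then
          (PySem.Set.add st.1 (r, c), (PySem.List.remove? st.2 ch).getD st.2)
        else st)
      (cells, pool)).1 =
    (placed.foldl
      (fun (st : PySem.Set (Int × Int) × PySem.Dict String Int) t =>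
        let (r, c, ch) := t
        if st.2.getD ch 0 > 0 then
          (PySem.Set.add st.1 (r, c), st.2.insert ch (st.2.getD ch 0 - 1))
        else st)
      (cells, d)).1 := by
  induction placed generalizing cells pool d with
  | nil => rfl
  | cons t rest ih =>
    obtain ⟨r, c, ch⟩ := t
    simp only [List.foldl_cons]
    by_cases hmem : ch ∈ pool
    · have hcontains : pool.contains ch = true := by
        simpa [List.contains_iff_mem] using hmem
      have hcount : 0 < pool.count ch := List.count_pos_iff.2 hmem
      have hpos : d.getD ch 0 > 0 := by rw [h ch]; exact_mod_cast hcount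
      have hrem : PySem.List.remove? pool ch = some (pool.erase ch) :=
        PySem.List.remove?_eq_some_erase pool ch hmem
      rw [if_pos hcontains, if_pos hpos, hrem]
      simp only [Option.getD_some]
      apply ih
      intro ch'
      rw [PySem.Dict.getD_insert]
      by_cases he : ch' = ch
      · rw [if_pos he, h ch, he, List.count_erase_self]
        omega
      · rw [if_neg he, h ch', List.count_erase_of_ne he]
    · have hcontains : pool.contains ch = false := by
        simpa [List.contains_iff_mem] using hmem
      have hzero : pool.count ch = 0 := List.count_eq_zero.2 hmem
      have hnpos : ¬ d.getD ch 0 > 0 := by rw [h ch, hzero]; omega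
      simp only [hcontains, Bool.false_eq_true, if_false, if_neg hnpos]
      exact ih cells pool d h

-- Membership in the prefix of the index list of entries with character ch.
theorem mem_take_idxs (ch : String) :
    ∀ (xs : List (Int × Int × String)) (s : Int) (k : Nat) (j : Int),
    (j ∈ ((((PySem.List.enumerate xs s).filter (fun q => q.2.2.2 == ch)).map (fun q => q.1)).take k))
    ↔ ∃ (t : Nat), ∃ (_ : t < xs.length), j = s + (t : Int) ∧ xs[t].2.2 = ch ∧
        (xs.take t).countP (fun e => e.2.2 == ch) < k := by
  intro xs
  induction xs with
  | nil => intro s k j; simp [PySem.List.enumerate_nil]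
  | cons x rest ih =>
    intro s k j
    rw [PySem.List.enumerate_cons]
    by_cases hx : x.2.2 = ch
    · cases k with
      | zero => simp
      | succ m =>
        rw [List.filter_cons_of_pos (by simpa using hx)]
        rw [List.map_cons, List.take_succ_cons]
        simp only [List.mem_cons]
        constructor
        · rintro (rfl | hmem)
          · exact ⟨0, by simp, by simp, hx, by simp⟩
          · obtain ⟨t, ht, hjt, hcht, hcnt⟩ := (ih (s+1) m j).1 hmem
            refine ⟨t+1, by simp only [List.length_cons]; omega, by rw [hjt]; push_cast; ring, by simpa using hcht, ?_⟩
            rw [List.take_succ_cons, List.countP_cons]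
            simp only [hx, beq_self_eq_true, if_true]
            omega
        · rintro ⟨t, ht, hjt, hcht, hcnt⟩
          cases t with
          | zero => left; simpa using hjt
          | succ t' =>
            right
            apply (ih (s+1) m j).2
            refine ⟨t', by simp only [List.length_cons] at ht; omega, by rw [hjt]; push_cast; ring, by simpa using hcht, ?_⟩
            rw [List.take_succ_cons, List.countP_cons] at hcnt
            simp only [hx, beq_self_eq_true, if_true] at hcnt
            omega
    · rw [List.filter_cons_of_neg (by simpa using hx)]
      rw [ih (s+1) k j]
      have hxf : (x.2.2 == ch) = false := by simpa using hx
      constructor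
      · rintro ⟨t, ht, hjt, hcht, hcnt⟩
        refine ⟨t+1, by simp only [List.length_cons]; omega, by rw [hjt]; push_cast; ring, by simpa using hcht, ?_⟩
        rw [List.take_succ_cons, List.countP_cons]
        simp only [hxf, Bool.false_eq_true, if_false]
        omega
      · rintro ⟨t, ht, hjt, hcht, hcnt⟩
        cases t with
        | zero => exact absurd (by simpa using hcht) hx
        | succ t' =>
          refine ⟨t', by simp only [List.length_cons] at ht; omega, by rw [hjt]; push_cast; ring, by simpa using hcht, ?_⟩
          rw [List.take_succ_cons, List.countP_cons] at hcnt
          simp only [hxf, Bool.false_eq_true, if_false] at hcnt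
          omega

-- The counter-decrement fold equals the membership fold over the enumeration,
-- given the counter invariant and a characterisation of the winner test W.
theorem counter_eq_mem (K : String → Nat) (W : Int → Bool) :
    ∀ (xs : List (Int × Int × String)) (s : Int) (cells : PySem.Set (Int × Int))
      (d : PySem.Dict String Int) (seen : String → Nat),
    (∀ ch, d.getD ch 0 = (K ch : Int) - (min (seen ch) (K ch) : Nat)) →
    (∀ (j : Nat) (_ : j < xs.length),
        W (s + (j : Int)) = decide (seen (xs[j].2.2) + (xs.take j).countP (fun e => e.2.2 == xs[j].2.2) < K (xs[j].2.2))) →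
    (xs.foldl
      (fun (st : PySem.Set (Int × Int) × PySem.Dict String Int) t =>
        let (r, c, ch) := t
        if st.2.getD ch 0 > 0 then
          (PySem.Set.add st.1 (r, c), st.2.insert ch (st.2.getD ch 0 - 1))
        else st)
      (cells, d)).1
    = (PySem.List.enumerate xs s).foldl
        (fun cs q => if W q.1 then PySem.Set.add cs (q.2.1, q.2.2.1) else cs) cells := by
  intro xs
  induction xs with
  | nil => intro s cells d seen hd hW; simp [PySem.List.enumerate_nil]
  | cons x rest ih =>
    intro s cells d seen hd hW
    obtain ⟨r, c, ch⟩ := x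
    rw [PySem.List.enumerate_cons]
    simp only [List.foldl_cons]
    have hW0 := hW 0 (by simp)
    simp only [Nat.cast_zero, add_zero, List.getElem_cons_zero, List.take_zero,
      List.countP_nil] at hW0
    have hWtail : ∀ (j : Nat) (_ : j < rest.length),
        W (s + 1 + (j : Int)) = decide ((if rest[j].2.2 = ch then seen (rest[j].2.2) + 1 else seen (rest[j].2.2)) + (rest.take j).countP (fun e => e.2.2 == rest[j].2.2) < K (rest[j].2.2)) := by
      intro j hj
      have h1 := hW (j+1) (by simpa using Nat.succ_lt_succ hj)
      simp only [List.getElem_cons_succ, List.take_succ_cons, List.countP_cons] at h1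
      rw [show s + 1 + (j : Int) = s + ((j+1 : Nat) : Int) by push_cast; ring]
      rw [h1, decide_eq_decide]
      rcases eq_or_ne (rest[j].2.2) ch with he | he
      · have : (ch == rest[j].2.2) = true := by simp [he]
        simp only [this, if_true, if_pos he]
        omega
      · have : (ch == rest[j].2.2) = false := by simpa using (Ne.symm he)
        simp only [this, Bool.false_eq_true, if_false, if_neg he]
        omega
    by_cases hlt : seen ch < K ch
    · have hpos : d.getD ch 0 > 0 := by have := hd ch; omega
      have hwtrue : W s = true := by rw [hW0]; simp only [decide_eq_true_eq]; omega
      rw [if_pos hpos, if_pos (by rw [hwtrue])]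
      refine ih (s+1) (PySem.Set.add cells (r, c)) (d.insert ch (d.getD ch 0 - 1))
        (fun x => if x = ch then seen x + 1 else seen x) ?_ ?_
      · intro ch'
        rw [PySem.Dict.getD_insert]
        rcases eq_or_ne ch' ch with he | he
        · subst he
          simp only [if_true]
          have := hd ch'
          omega
        · simp only [if_neg he]
          exact hd ch'
      · exact hWtail
    · have hnpos : ¬ d.getD ch 0 > 0 := by have := hd ch; omega
      have hwfalse : W s = false := by rw [hW0]; simp only [decide_eq_false_iff_not]; omega
      rw [if_neg hnpos, if_neg (by rw [hwfalse]; simp)]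
      refine ih (s+1) cells d (fun x => if x = ch then seen x + 1 else seen x) ?_ ?_
      · intro ch'
        rcases eq_or_ne ch' ch with he | he
        · subst he
          simp only [if_true]
          have := hd ch'
          omega
        · simp only [if_neg he]
          exact hd ch'
      · exact hWtail

-- Membership in the fold that unions per-character winner lists.
theorem mem_foldl_update (g : String → List Int) :
    ∀ (ks : List String) (w : PySem.Set Int) (j : Int),
    j ∈ ks.foldl (fun w ch => PySem.Set.update w (g ch)) w ↔ j ∈ w ∨ ∃ ch ∈ ks, j ∈ g ch := by
  intro ks
  induction ks with
  | nil => simp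
  | cons ch rest ih =>
    intro w j
    simp only [List.foldl_cons, ih, PySem.Set.mem_update]
    constructor
    · rintro ((h | h) | ⟨ch', hm, hg⟩)
      · exact Or.inl h
      · exact Or.inr ⟨ch, by simp, h⟩
      · exact Or.inr ⟨ch', by simp [hm], hg⟩
    · rintro (h | ⟨ch', hm, hg⟩)
      · exact Or.inl (Or.inl h)
      · rcases List.mem_cons.1 hm with h1 | h1
        · exact Or.inl (Or.inr (h1 ▸ hg))
        · exact Or.inr ⟨ch', h1, hg⟩

-- ===== VERDICT (by name: the statement is the Claim_ definition above) =====
theorem build_joker_cells_spec : Claim_equal_build_joker_cells := by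
  intro placed joker_used _
  unfold Spec_build_joker_cells
  simp only [build_joker_cells, build_joker_cells_alt]
  set counts : PySem.Dict String Int :=
    joker_used.foldl (fun d ch => d.insert ch (d.getD ch 0 + 1)) PySem.Dict.empty with hc
  set winners : PySem.Set Int :=
    counts.keys.foldl
      (fun w ch =>
        PySem.Set.update w (PySem.List.slice
          (((PySem.List.enumerate placed 0).filter (fun q => q.2.2.2 == ch)).map (fun q => q.1))
          none (some (counts.getD ch 0))))
      PySem.Set.empty with hw
  have hcnt : ∀ ch, counts.getD ch 0 = (joker_used.count ch : Int) := by
    intro ch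
    rw [hc, PySem.Dict.getD_foldl_insert_add_one]
    simp [PySem.Dict.getD_empty]
  have hkeys : ∀ ch, ch ∈ counts.keys ↔ ch ∈ joker_used := by
    intro ch
    rw [hc, PySem.Dict.keys_foldl_insert, PySem.Dict.keys_empty, PySem.Set.mem_update]
    simp
  have hwin : ∀ v : Int, v ∈ winners ↔ ∃ ch ∈ counts.keys,
      v ∈ ((((PySem.List.enumerate placed 0).filter (fun q => q.2.2.2 == ch)).map (fun q => q.1)).take (joker_used.count ch)) := by
    intro v
    rw [hw]
    rw [mem_foldl_update (g := fun ch => PySem.List.slice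
          (((PySem.List.enumerate placed 0).filter (fun q => q.2.2.2 == ch)).map (fun q => q.1))
          none (some (counts.getD ch 0)))]
    simp only [hcnt, PySem.List.slice_to_natCast]
    simp [PySem.Set.empty]
  have hd0 : ∀ ch, counts.getD ch 0 = ((joker_used.count ch : Nat) : Int) - ((min 0 (joker_used.count ch) : Nat) : Int) := by
    intro ch
    rw [hcnt ch]
    simp
  have hW : ∀ (j : Nat) (_ : j < placed.length),
      winners.contains ((0 : Int) + (j : Int)) = decide ((0 : Nat) + (placed.take j).countP (fun e => e.2.2 == placed[j].2.2) < joker_used.count (placed[j].2.2)) := by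
    intro j hj
    rw [Bool.eq_iff_iff, PySem.Set.contains_iff, decide_eq_true_eq, hwin]
    constructor
    · rintro ⟨ch, hk, hmem⟩
      rw [mem_take_idxs] at hmem
      obtain ⟨t, ht, hjt, hcht, hlt⟩ := hmem
      have htj : t = j := by
        have : ((0 : Int) + (j : Int)) = 0 + (t : Int) := hjt
        omega
      subst htj
      rw [← hcht] at hlt
      simpa using hlt
    · intro hlt
      refine ⟨placed[j].2.2, ?_, ?_⟩
      · rw [hkeys]
        exact List.count_pos_iff.1 (by omega)
      · rw [mem_take_idxs]
        exact ⟨j, hj, by simp, rfl, by simpa using hlt⟩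
  rw [fold_agree placed PySem.Set.empty joker_used counts hcnt]
  rw [counter_eq_mem (fun ch => joker_used.count ch) (PySem.Set.contains winners) placed 0
    PySem.Set.empty counts (fun _ => 0) hd0 hW]
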